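/- GENERATED by mk_final_copies.py from the proof of the farm's unit `vorbis_decode_initial.1` (farm:vorbis_decode_initial.1.1: Proof.lean) as the
   re-elaboration sweep compiled it — do not edit. -/
import Asan.CheckWalk
import Vorbis.Spec.Units.vorbis_decode_initial_1

open X86 X86.User Asan Vorbis Vorbis.Spec Vorbis.Spec.vorbis_decode_initial

set_option maxRecDepth 4000
set_option maxHeartbeats 4000000

/-- Segment 1 of `vorbis_decode_initial` (0x113160–0x1131a6, 19 instructions, two check sites; stb_vorbis_fixed.c 3152–3156): the prologue and
`f->channel_buffer_start = f->channel_buffer_end = 0`, from the entry to the head `loop1` of the retry loop, where `IAt` holds: the checks by OB1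
(`DecodeInv.objLive`), `Bits` over the two stores by `di_keep`. The farm worker's `prologue`. -/
theorem Vorbis.Spec.Worked.vorbis_decode_initial_1_ok : Vorbis.Spec.vorbis_decode_initial_1.Statement := by
  intro Lay hLay μ hμ u₀ hcode hstore4 others frames len A stored room ysz u ret hE
  have he := hE.entry
  have hpre := hE.pre
  v_entry he
  obtain ⟨hsh, hinv, hpls, hple, hprs, hpre_, hpm, hapart⟩ := hpre
  have hsp := hsh.rsp
  have hobj := hinv.objLive
  have hwhere := hobj.where_ hsh.inv hsh.offText (by decide)
  simp only [Off.sizeof.stb_vorbis] at hwhere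
  have hbits0 := hinv.fb.vorbis.bits
  u_walk hcode [hμ.vendor] until [Vorbis.L.vorbis_decode_initial.loop1] span [Vorbis.L.textLo, Vorbis.L.textHi] side (v_side)
  case check_11318b =>
    have hun : ShadowUntouched u.mem s_11318b.mem := by v_untouched
    refine hobj.accSmall hsh.inv hun _ 4 (by decide) (by u_omega) ?_
    simp only [Vorbis.Off.sizeof.stb_vorbis]
    u_omega
  case check_1131a1 =>
    have hun : ShadowUntouched u.mem s_1131a1.mem := by v_untouched
    refine hobj.accSmall hsh.inv hun _ 4 (by decide) (by u_omega) ?_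
    simp only [Vorbis.Off.sizeof.stb_vorbis]
    u_omega
  -- 0x1131b0, the head of the `retry:` loop (stb_vorbis_fixed.c:3158): the assertion `At`
  refine ReachVia.done ?_
  have hkept : RegsKept iLoopRegs u s_1131a6 := w_kept.mono_all (by rfl)
  have hsame : Mem.SameExcept [⟨(u.reg .rsp).toNat - 448, (u.reg .rsp).toNat⟩,
      ⟨(u.reg .rdi).toNat + 48, (u.reg .rdi).toNat + 56⟩, ⟨(u.reg .rdi).toNat + 84, (u.reg .rdi).toNat + 96⟩,
      ⟨(u.reg .rdi).toNat + 136, (u.reg .rdi).toNat + 144⟩, ⟨(u.reg .rdi).toNat + 1484, (u.reg .rdi).toNat + 1749⟩,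
      ⟨(u.reg .rdi).toNat + 1752, (u.reg .rdi).toNat + 1784⟩, ⟨(u.reg .rdi).toNat + 1796, (u.reg .rdi).toNat + 1804⟩]
      u.mem s_1131a6.mem := by
    u_same
  have hun : ShadowUntouched u.mem s_1131a6.mem := by v_untouched
  have hs0 : UInt64.ofNat (s_1131a6.mem.readLE (u.reg .rsp) 8) = ret := by u_resolve
  have hs1 : UInt64.ofNat (s_1131a6.mem.readLE (u.reg .rsp - 8) 8) = u.reg .r15 := by u_resolve
  have hs2 : UInt64.ofNat (s_1131a6.mem.readLE (u.reg .rsp - 16) 8) = u.reg .r14 := by u_resolve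
  have hs3 : UInt64.ofNat (s_1131a6.mem.readLE (u.reg .rsp - 24) 8) = u.reg .r13 := by u_resolve
  have hs4 : UInt64.ofNat (s_1131a6.mem.readLE (u.reg .rsp - 32) 8) = u.reg .r12 := by u_resolve
  have hs5 : UInt64.ofNat (s_1131a6.mem.readLE (u.reg .rsp - 40) 8) = u.reg .rbp := by u_resolve
  have hs6 : UInt64.ofNat (s_1131a6.mem.readLE (u.reg .rsp - 48) 8) = u.reg .rbx := by u_resolve
  have hs7 : UInt64.ofNat (s_1131a6.mem.readLE (u.reg .rsp - 80) 8) = u.reg .rcx := by u_resolve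
  have hs8 : UInt64.ofNat (s_1131a6.mem.readLE (u.reg .rsp - 72) 8) = u.reg .r8 := by u_resolve
  have hdf : s_1131a6.flags .df = false := by
    rw [w_flags]
    exact w_df_1131a1
  have hmx : s_1131a6.mxcsr &&& 8064 = 8064 := by
    rw [w_mxcsr]
    exact he_mx
  have hbits : Bits (RunBlk A len) len s_1131a6.mem (u.reg .rdi).toNat := by
    have hS : Mem.SameExcept [⟨(u.reg .rsp).toNat - 448, (u.reg .rsp).toNat⟩,
        ⟨(u.reg .rdi).toNat + 1796, (u.reg .rdi).toNat + 1804⟩] u.mem s_1131a6.mem := by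
      u_same
    refine (di_keep hbits0 hS ?_).1
    intro w hw
    simp only [List.mem_cons, List.not_mem_nil, or_false] at hw
    rcases hw with rfl | rfl
    · simp only []
      omega
    · simp only []
      omega
  have hcbs : s_1131a6.mem.readLE (u.reg .rdi + 1800) 4 = 0 := by
    rw [w_mem]
    u_read
  have hcbe : s_1131a6.mem.readLE (u.reg .rdi + 1796) 4 = 0 := by
    rw [w_mem]
    u_read
  exact ⟨w_rip, w_rsp, w_rbx, w_r12, w_r13, w_r14, hkept, w_eq, hsame, hun, hs0, hs1, hs2, hs3, hs4, hs5, hs6, hs7, hs8,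
    hdf, hmx, hbits, hcbs, hcbe⟩
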